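-- pv_equiv track=rewrite | github.com/haleyyew/integration_project_semantic_schema_matching | representation_transfer.py | transfer_mapping_to_topic_per_table
-- ===== SOURCE A (Python) =====
-- def transfer_mapping_to_topic_per_table(many_to_many_mappings, tables):
--     final_output = {}
--     for table in tables:
--         topics_output = []
--         table_mappings = get_pairs_for_table(many_to_many_mappings, table)
--
--         for topic in table_mappings:
--             if len(table_mappings[topic]) != 0:
--                 topics_output.append(topic)
--
--         final_output[table] = topics_output
--
--     return final_output
--
-- def get_pairs_for_table(many_to_many_mappings, table_name):
--     table_mappings = {}
--     for topic in many_to_many_mappings: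
--         values = []
--         for value in many_to_many_mappings[topic]:
--             if value[0] == table_name:
--                 values.append(value)
--         table_mappings[topic] = values
--
--     return table_mappings
-- ===== SOURCE B (Python) =====
-- def transfer_mapping_to_topic_per_table(many_to_many_mappings, tables):
--     out = {table: [] for table in tables}
--     for topic, values in many_to_many_mappings.items():
--         seen = set()
--         for tname, _ in values:
--             if tname in out and tname not in seen:
--                 out[tname].append(topic)
--                 seen.add(tname)
--     return out
-- ===== Notes on version B (the rewrite author's own statement) =====
-- stated objective: faster
-- what changed: Instead of rebuilding a filtered per-topic mapping dict for every table (A's nested get_pairs_for_table scan), B initialises an empty topic list per table and makes a single pass over the mappings, appending each topic to every distinct table named in its values.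
import Mathlib
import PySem

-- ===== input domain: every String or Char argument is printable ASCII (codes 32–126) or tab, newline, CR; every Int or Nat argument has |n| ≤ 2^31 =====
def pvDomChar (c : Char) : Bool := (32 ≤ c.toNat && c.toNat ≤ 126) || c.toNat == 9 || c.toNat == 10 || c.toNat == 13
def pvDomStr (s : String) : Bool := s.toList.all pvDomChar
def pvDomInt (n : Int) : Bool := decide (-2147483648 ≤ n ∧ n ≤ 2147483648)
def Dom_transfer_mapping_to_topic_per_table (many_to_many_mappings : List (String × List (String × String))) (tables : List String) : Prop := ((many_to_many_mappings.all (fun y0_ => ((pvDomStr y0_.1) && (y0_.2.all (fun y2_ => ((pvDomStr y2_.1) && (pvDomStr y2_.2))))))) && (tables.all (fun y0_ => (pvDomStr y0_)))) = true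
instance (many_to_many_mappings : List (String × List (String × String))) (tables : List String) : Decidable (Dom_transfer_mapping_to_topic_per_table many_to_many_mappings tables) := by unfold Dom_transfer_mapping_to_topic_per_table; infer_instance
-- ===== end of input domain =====

-- B replaces A's per-table rescan of all mappings by one pass over the mappings that
-- appends each topic to the lists of the tables its values name (objective: faster).

-- ===== PORT A =====
def pvGetPairsForTable (many_to_many_mappings : List (String × List (String × String))) (table_name : String) : PySem.Dict String (List (String × String)) :=
  (PySem.Dict.ofList many_to_many_mappings).items.foldl
    (fun table_mappings tv =>
      table_mappings.insert tv.1
        (tv.2.foldl (fun values v => if v.1 == table_name then values ++ [v] else values) []))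
    PySem.Dict.empty

def transfer_mapping_to_topic_per_table (many_to_many_mappings : List (String × List (String × String))) (tables : List String) : List (String × List String) :=
  (tables.foldl
    (fun final_output table =>
      final_output.insert table
        ((pvGetPairsForTable many_to_many_mappings table).items.foldl
          (fun topics_output tv => if tv.2.length ≠ 0 then topics_output ++ [tv.1] else topics_output) []))
    PySem.Dict.empty).items

-- ===== PORT B =====
def transfer_mapping_to_topic_per_table_alt (many_to_many_mappings : List (String × List (String × String))) (tables : List String) : List (String × List String) :=
  let out0 : PySem.Dict String (List String) :=
    tables.foldl (fun out table => out.insert table []) PySem.Dict.empty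
  ((PySem.Dict.ofList many_to_many_mappings).items.foldl
    (fun out tv =>
      (tv.2.foldl
        (fun (p : PySem.Dict String (List String) × PySem.Set String) v =>
          if p.1.contains v.1 && !(PySem.Set.contains p.2 v.1)
          then (p.1.modify v.1 [] (· ++ [tv.1]), PySem.Set.add p.2 v.1)
          else p)
        (out, PySem.Set.empty)).1)
    out0).items

-- ===== PRECONDITION & SPEC =====
def Spec_transfer_mapping_to_topic_per_table (many_to_many_mappings : List (String × List (String × String))) (tables : List String) (out : List (String × List String)) : Prop := out = transfer_mapping_to_topic_per_table_alt many_to_many_mappings tables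
instance (many_to_many_mappings : List (String × List (String × String))) (tables : List String) (out : List (String × List String)) : Decidable (Spec_transfer_mapping_to_topic_per_table many_to_many_mappings tables out) := by unfold Spec_transfer_mapping_to_topic_per_table; infer_instance

-- ===== CLAIM (what is proved, stated in full; the proofs are below) =====
def Claim_equal_transfer_mapping_to_topic_per_table : Prop := ∀ (many_to_many_mappings : List (String × List (String × String))) (tables : List String), Dom_transfer_mapping_to_topic_per_table many_to_many_mappings tables → Spec_transfer_mapping_to_topic_per_table many_to_many_mappings tables (transfer_mapping_to_topic_per_table many_to_many_mappings tables)

-- ===== LEMMAS AND PROOFS =====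

-- a fold of inserts whose inserted value depends only on the key, over a dict of the same shape
theorem pv_foldl_insert_fun (g : String → List String) (tables s : List String) (hs : s.Nodup) :
    tables.foldl (fun d t => d.insert t (g t)) (PySem.Dict.mk (s.map (fun t => (t, g t))))
      = PySem.Dict.mk ((PySem.Set.update s tables).map (fun t => (t, g t))) := by
  induction tables generalizing s with
  | nil => simp [PySem.Set.update]
  | cons t ts ih =>
    have hins : (PySem.Dict.mk (s.map (fun t => (t, g t)))).insert t (g t)
        = PySem.Dict.mk ((PySem.Set.add s t).map (fun t => (t, g t))) := by
      by_cases ht : t ∈ s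
      · apply PySem.Dict.ext
        have hc : (PySem.Dict.mk (s.map (fun t => (t, g t)))).contains t = true := by
          simp [PySem.Dict.contains_mk]
          exact ht
        rw [PySem.Dict.items_insert_of_contains _ _ hc]
        simp only [PySem.Set.add_of_mem ht, List.map_map]
        refine List.map_congr_left (fun x hx => ?_)
        by_cases hxt : x = t
        · simp [hxt]
        · simp [Function.comp, hxt, beq_iff_eq]
      · apply PySem.Dict.ext
        have hc : (PySem.Dict.mk (s.map (fun t => (t, g t)))).contains t = false := by
          simp [PySem.Dict.contains_mk, beq_iff_eq]
          intro x hx hxt; exact ht (hxt ▸ hx)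
        rw [PySem.Dict.items_insert_of_not_contains _ _ hc]
        simp [PySem.Set.add_of_not_mem ht]
    rw [List.foldl_cons, hins, ih _ (PySem.Set.nodup_add s t hs), PySem.Set.update_cons]

-- the inner value loop of B: appends tv-topic once to each table of the values that is a key and unseen
theorem pv_inner_loop (vals : List (String × String)) (S seen : List String) (hS : S.Nodup)
    (h : String → List String) (topic : String) (hsub : ∀ x ∈ seen, x ∈ S) :
    (vals.foldl
        (fun (p : PySem.Dict String (List String) × PySem.Set String) v =>
          if p.1.contains v.1 && !(PySem.Set.contains p.2 v.1)
          then (p.1.modify v.1 [] (· ++ [topic]), PySem.Set.add p.2 v.1)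
          else p)
        (PySem.Dict.mk (S.map (fun t => (t, if t ∈ seen then h t ++ [topic] else h t))), seen)).1
      = PySem.Dict.mk (S.map (fun t =>
          (t, if t ∈ seen ∨ t ∈ vals.map Prod.fst then h t ++ [topic] else h t))) := by
  induction vals generalizing seen with
  | nil => simp
  | cons v vs ih =>
    rw [List.foldl_cons]
    by_cases hin : v.1 ∈ S
    · by_cases hseenv : v.1 ∈ seen
      · have hsc : PySem.Set.contains seen v.1 = true := by
          simp [PySem.Set.contains_eq_listContains]; exact hseenv
        simp only [hsc, Bool.not_true, Bool.and_false]
        rw [if_neg (by simp), ih seen hsub]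
        refine congrArg PySem.Dict.mk (List.map_congr_left fun t htS => ?_)
        by_cases h1 : t ∈ seen
        · simp [h1]
        · have hne : t ≠ v.1 := fun he => h1 (he ▸ hseenv)
          exact congrArg (fun l => (t, l)) (if_congr (by simp only [List.map_cons, List.mem_cons]; tauto) rfl rfl)
      · have hct : (PySem.Dict.mk (S.map (fun t =>
            (t, if t ∈ seen then h t ++ [topic] else h t)))).contains v.1 = true := by
          simp [PySem.Dict.contains_mk, beq_iff_eq]; exact hin
        have hsc : PySem.Set.contains seen v.1 = false := by
          simp [PySem.Set.contains_eq_listContains]; exact hseenv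
        simp only [hct, hsc, Bool.not_false, Bool.and_true]
        rw [if_pos trivial]
        have hkeys : (PySem.Dict.mk (S.map (fun t =>
            (t, if t ∈ seen then h t ++ [topic] else h t)))).keys.Nodup := by
          simpa [PySem.Dict.keys, Function.comp_def] using hS
        have hmem : (v.1, h v.1) ∈ (PySem.Dict.mk (S.map (fun t =>
            (t, if t ∈ seen then h t ++ [topic] else h t)))).items := by
          refine List.mem_map.mpr ⟨v.1, hin, ?_⟩; simp [hseenv]
        have hget : (PySem.Dict.mk (S.map (fun t =>
            (t, if t ∈ seen then h t ++ [topic] else h t)))).getD v.1 [] = h v.1 :=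
          PySem.Dict.getD_of_mem_items _ hmem hkeys []
        have hmod : (PySem.Dict.mk (S.map (fun t =>
            (t, if t ∈ seen then h t ++ [topic] else h t)))).modify v.1 [] (· ++ [topic])
            = PySem.Dict.mk (S.map (fun t =>
                (t, if t ∈ seen ++ [v.1] then h t ++ [topic] else h t))) := by
          rw [PySem.Dict.modify, hget]
          apply PySem.Dict.ext
          rw [PySem.Dict.items_insert_of_contains _ _ hct]
          show (S.map _).map _ = S.map _
          rw [List.map_map]
          refine List.map_congr_left fun x hx => ?_
          by_cases hxv : x = v.1
          · subst hxv; simp [hseenv]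
          · simp [Function.comp, hxv, beq_iff_eq, List.mem_append]
        have hadd : PySem.Set.add seen v.1 = seen ++ [v.1] := PySem.Set.add_of_not_mem hseenv
        rw [hmod, hadd, ih (seen ++ [v.1])
          (fun x hx => by rcases List.mem_append.mp hx with h | h
                          · exact hsub x h
                          · simp at h; exact h ▸ hin)]
        refine congrArg PySem.Dict.mk (List.map_congr_left fun t htS => ?_)
        by_cases h1 : t = v.1
        · simp [h1, List.mem_append]
        · by_cases h2 : t ∈ seen
          · simp [h2, List.mem_append]
          · exact congrArg (fun l => (t, l)) (if_congr (by simp only [List.map_cons, List.mem_append, List.mem_cons]; tauto) rfl rfl)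
    · have hct : (PySem.Dict.mk (S.map (fun t =>
          (t, if t ∈ seen then h t ++ [topic] else h t)))).contains v.1 = false := by
        simp [PySem.Dict.contains_mk, beq_iff_eq]
        intro x hx hxv; exact hin (hxv ▸ hx)
      simp only [hct, Bool.false_and]
      rw [if_neg (by simp), ih seen hsub]
      refine congrArg PySem.Dict.mk (List.map_congr_left fun t htS => ?_)
      have hne : t ≠ v.1 := fun he => hin (he ▸ htS)
      exact congrArg (fun l => (t, l)) (if_congr (by simp only [List.map_cons, List.mem_cons]; tauto) rfl rfl)

-- the outer topic loop of B
theorem pv_outer_loop (M : List (String × List (String × String))) (S : List String) (hS : S.Nodup)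
    (h : String → List String) :
    M.foldl
        (fun out tv =>
          (tv.2.foldl
            (fun (p : PySem.Dict String (List String) × PySem.Set String) v =>
              if p.1.contains v.1 && !(PySem.Set.contains p.2 v.1)
              then (p.1.modify v.1 [] (· ++ [tv.1]), PySem.Set.add p.2 v.1)
              else p)
            (out, PySem.Set.empty)).1)
        (PySem.Dict.mk (S.map (fun t => (t, h t))))
      = PySem.Dict.mk (S.map (fun t =>
          (t, h t ++ (M.filter (fun tv => decide (t ∈ tv.2.map Prod.fst))).map Prod.fst))) := by
  induction M generalizing h with
  | nil => simp
  | cons tv rest ih =>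
    rw [List.foldl_cons]
    have h0 : S.map (fun t => (t, h t))
        = S.map (fun t => (t, if t ∈ (PySem.Set.empty : PySem.Set String) then h t ++ [tv.1] else h t)) := by simp [PySem.Set.empty]
    rw [h0, pv_inner_loop tv.2 S PySem.Set.empty hS h tv.1 (fun x hx => absurd hx (List.not_mem_nil))]
    have h1 : S.map (fun t => (t, if t ∈ (PySem.Set.empty : PySem.Set String) ∨ t ∈ tv.2.map Prod.fst
            then h t ++ [tv.1] else h t))
        = S.map (fun t => (t, if t ∈ tv.2.map Prod.fst then h t ++ [tv.1] else h t)) :=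
      List.map_congr_left fun a _ => congrArg (fun l => (a, l))
        (if_congr (by simp [PySem.Set.empty]) rfl rfl)
    rw [h1, ih (fun t => if t ∈ tv.2.map Prod.fst then h t ++ [tv.1] else h t)]
    refine congrArg PySem.Dict.mk (List.map_congr_left fun t htS => ?_)
    refine congrArg (fun l => (t, l)) ?_
    by_cases hm : t ∈ tv.2.map Prod.fst
    · simp [hm]
    · simp [hm]

-- A's per-table topic list, in closed form
theorem pv_topicsA (m : List (String × List (String × String))) (t : String) :
    (pvGetPairsForTable m t).items.foldl
        (fun topics_output tv => if tv.2.length ≠ 0 then topics_output ++ [tv.1] else topics_output) []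
      = ((PySem.Dict.ofList m).items.filter (fun tv => decide (t ∈ tv.2.map Prod.fst))).map Prod.fst := by
  have hinner : ∀ (l : List (String × String)) (acc : List (String × String)),
      l.foldl (fun values v => if v.1 == t then values ++ [v] else values) acc
        = acc ++ l.filter (fun v => v.1 == t) := by
    intro l
    induction l with
    | nil => intro acc; simp
    | cons v vs ihv =>
      intro acc
      rw [List.foldl_cons]
      by_cases hv : v.1 = t
      · rw [if_pos (by simp [hv]), ihv]
        simp [hv]
      · rw [if_neg (by simp [hv]), ihv]
        simp [hv]
  have houter : ∀ (L : List (String × List (String × String))) (acc : List String),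
      (L.map (fun tv => (tv.1, tv.2.filter (fun v => v.1 == t)))).foldl
          (fun topics_output tv => if tv.2.length ≠ 0 then topics_output ++ [tv.1] else topics_output) acc
        = acc ++ (L.filter (fun tv => decide (t ∈ tv.2.map Prod.fst))).map Prod.fst := by
    intro L
    induction L with
    | nil => intro acc; simp
    | cons tv rest ihL =>
      intro acc
      rw [List.map_cons, List.foldl_cons]
      by_cases hm : t ∈ tv.2.map Prod.fst
      · have hne : (tv.2.filter (fun v => v.1 == t)).length ≠ 0 := by
          simp only [ne_eq, List.length_eq_zero_iff, List.filter_eq_nil_iff, beq_iff_eq]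
          push Not
          obtain ⟨v, hv, hvt⟩ := List.mem_map.mp hm
          exact ⟨v, hv, hvt⟩
        rw [if_pos hne, ihL]
        simp [hm]
      · have heq : (tv.2.filter (fun v => v.1 == t)).length = 0 := by
          simp only [List.length_eq_zero_iff, List.filter_eq_nil_iff, beq_iff_eq]
          intro v hv hvt
          exact hm (List.mem_map.mpr ⟨v, hv, hvt⟩)
        rw [if_neg (by simp [heq]), ihL]
        simp [hm]
  have hitems : (pvGetPairsForTable m t).items
      = (PySem.Dict.ofList m).items.map (fun tv => (tv.1, tv.2.filter (fun v => v.1 == t))) := by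
    rw [pvGetPairsForTable]
    have hmap : ((PySem.Dict.ofList m).items.foldl
        (fun table_mappings tv => table_mappings.insert tv.1
          (tv.2.foldl (fun values v => if v.1 == t then values ++ [v] else values) []))
        PySem.Dict.empty).items
        = PySem.Dict.empty.items ++ (PySem.Dict.ofList m).items.map
            (fun tv => (tv.1, tv.2.foldl (fun values v => if v.1 == t then values ++ [v] else values) [])) :=
      PySem.Dict.items_foldl_insert_fresh (PySem.Dict.ofList m).items (fun tv => tv.1)
        (fun tv => tv.2.foldl (fun values v => if v.1 == t then values ++ [v] else values) [])
        PySem.Dict.empty (fun a _ => PySem.Dict.contains_empty a.1)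
        (PySem.Dict.nodup_keys_ofList m)
    rw [hmap]
    simp only [PySem.Dict.empty, List.nil_append]
    exact List.map_congr_left fun tv _ => congrArg (fun l => (tv.1, l)) (hinner tv.2 [])
  rw [hitems, houter]
  simp

-- ===== VERDICT (by name: the statement is the Claim_ definition above) =====
theorem transfer_mapping_to_topic_per_table_spec : Claim_equal_transfer_mapping_to_topic_per_table := by
  intro m tables _
  unfold Spec_transfer_mapping_to_topic_per_table
  simp only [transfer_mapping_to_topic_per_table, transfer_mapping_to_topic_per_table_alt]
  have hA : tables.foldl
      (fun final_output table => final_output.insert table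
        ((pvGetPairsForTable m table).items.foldl
          (fun topics_output tv => if tv.2.length ≠ 0 then topics_output ++ [tv.1] else topics_output)
          []))
      PySem.Dict.empty
      = PySem.Dict.mk ((PySem.Set.ofList tables).map (fun table => (table,
          (pvGetPairsForTable m table).items.foldl
            (fun topics_output tv => if tv.2.length ≠ 0 then topics_output ++ [tv.1] else topics_output)
            []))) := by
    rw [show (PySem.Dict.empty : PySem.Dict String (List String))
        = PySem.Dict.mk (([] : List String).map (fun table => (table,
            (pvGetPairsForTable m table).items.foldl
              (fun topics_output tv => if tv.2.length ≠ 0 then topics_output ++ [tv.1] else topics_output)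
              []))) from rfl,
      pv_foldl_insert_fun _ tables [] List.nodup_nil, PySem.Set.update_nil_left]
  have hB : tables.foldl (fun out table => out.insert table []) PySem.Dict.empty
      = PySem.Dict.mk ((PySem.Set.ofList tables).map (fun table => (table, ([] : List String)))) := by
    rw [show (PySem.Dict.empty : PySem.Dict String (List String))
        = PySem.Dict.mk (([] : List String).map (fun table => (table, ([] : List String)))) from rfl,
      pv_foldl_insert_fun (fun _ => ([] : List String)) tables [] List.nodup_nil,
      PySem.Set.update_nil_left]
  rw [hA, hB,
    pv_outer_loop (PySem.Dict.ofList m).items (PySem.Set.ofList tables)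
      (PySem.Set.nodup_ofList tables) (fun _ => ([] : List String))]
  refine List.map_congr_left fun t _ => congrArg (fun l => (t, l)) ?_
  rw [pv_topicsA m t]
  simp
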